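-- pv_equiv track=rewrite | github.com/sheryllan/tickdb | database_builder/archive/a.py | line2msg2
-- ===== SOURCE A (Python) =====
-- def line2msg2(string):
-- 	l = string[:-1].split(':')
-- 	data = {}
--
-- 	for i in range(0,len(l),2):
-- 		key = l[i]
-- 		if key in data:
-- 			data[key].append(l[i+1])
-- 		else:
-- 			data[key] = [l[i+1]]
--
-- 	d1 = {k+'.'+str(i):data[k][i] for k in list(data.keys()) if len(data[k])>1 for i in range(len(data[k]))}
-- 	d1.update({k:data[k][0] for k in list(data.keys()) if len(data[k])==1})
-- 	return d1
-- ===== SOURCE B (Python) =====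
-- def line2msg2(string):
--     l = string[:-1].split(':')
--     pairs = [(l[i], l[i + 1]) for i in range(0, len(l), 2)]
--     keys = [k for k, _ in pairs]
--     result = {}
--     for k in dict.fromkeys(keys):
--         if keys.count(k) > 1:
--             occ = [v for k2, v in pairs if k2 == k]
--             for n, v in enumerate(occ):
--                 result[k + '.' + str(n)] = v
--     for k, v in pairs:
--         if keys.count(k) == 1:
--             result[k] = v
--     return result
-- ===== Notes on version B (the rewrite author's own statement) =====
-- stated objective: alternative
-- what changed: Replaces A's one-pass dict-of-lists grouping plus two key-filtered comprehensions by a flat pair list: keys are deduplicated for order, duplicate keys get their occurrence list by a direct filter scan of the pairs, and unique keys are emitted straight from the pair stream - no grouping dict of value-lists is built.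
import Mathlib
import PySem

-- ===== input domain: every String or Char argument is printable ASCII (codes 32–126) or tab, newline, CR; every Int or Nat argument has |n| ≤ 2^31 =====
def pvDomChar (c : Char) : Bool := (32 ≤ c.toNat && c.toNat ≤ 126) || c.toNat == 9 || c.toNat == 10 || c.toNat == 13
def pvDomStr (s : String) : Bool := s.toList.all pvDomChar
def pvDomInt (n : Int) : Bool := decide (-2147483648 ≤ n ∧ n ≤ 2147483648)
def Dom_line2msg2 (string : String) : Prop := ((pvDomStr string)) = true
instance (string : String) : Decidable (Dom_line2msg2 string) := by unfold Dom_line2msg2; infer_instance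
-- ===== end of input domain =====

-- B replaces A's grouping dict (dict of value-lists plus two key-filtered comprehensions) by a flat
-- pair list: keys deduplicated for order, duplicate keys served by a direct filter scan of the pairs,
-- unique keys emitted straight from the pair stream (alternative decomposition, identical results on Pre_).

-- ===== PORT A =====
def line2msg2 (string : String) : List (String × String) :=
  let l := (PySem.Str.split? (PySem.Str.slice string none (some (-1))) ":").getD []
  let data : PySem.Dict String (List String) :=
    (PySem.List.pyRange 0 (PySem.List.len l) 2).foldl
      (fun d i =>
        if d.contains (PySem.List.pyGetD l i "") then
          d.modify (PySem.List.pyGetD l i "") [] (fun vs => vs ++ [PySem.List.pyGetD l (i + 1) ""])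
        else d.insert (PySem.List.pyGetD l i "") [PySem.List.pyGetD l (i + 1) ""])
      PySem.Dict.empty
  let d1 : PySem.Dict String String :=
    data.keys.foldl
      (fun d k =>
        if 1 < (data.getD k []).length then
          (PySem.List.pyRange 0 (PySem.List.len (data.getD k []))).foldl
            (fun d i => d.insert (k ++ "." ++ PySem.Int.toStr i)
              (PySem.List.pyGetD (data.getD k []) i "")) d
        else d) PySem.Dict.empty
  let d2 : PySem.Dict String String :=
    data.keys.foldl
      (fun d k =>
        if (data.getD k []).length == 1 then
          d.insert k (PySem.List.pyGetD (data.getD k []) 0 "")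
        else d) PySem.Dict.empty
  (d1.update d2.items).items

-- ===== PORT B =====
def line2msg2_alt (string : String) : List (String × String) :=
  let l := (PySem.Str.split? (PySem.Str.slice string none (some (-1))) ":").getD []
  let pairs := (PySem.List.pyRange 0 (PySem.List.len l) 2).map
      (fun i => (PySem.List.pyGetD l i "", PySem.List.pyGetD l (i + 1) ""))
  let keys := pairs.map (fun p => p.1)
  let result : PySem.Dict String String :=
    (PySem.List.dedup keys).foldl
      (fun d k =>
        if 1 < PySem.List.count keys k then
          (PySem.List.enumerate ((pairs.filter (fun p => p.1 == k)).map (fun x => x.2))).foldl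
            (fun d p => d.insert (k ++ "." ++ PySem.Int.toStr p.1) p.2) d
        else d) PySem.Dict.empty
  let result2 :=
    pairs.foldl
      (fun d p => if PySem.List.count keys p.1 == 1 then d.insert p.1 p.2 else d) result
  result2.items

-- ===== PRECONDITION & SPEC =====
-- Pre_ admits exactly the strings whose colon-split of string[:-1] has an even number of tokens
-- (every key token is followed by a value token); on all other strings both A and B raise IndexError.
def Pre_line2msg2 (string : String) : Prop :=
  ((PySem.Str.split? (PySem.Str.slice string none (some (-1))) ":").getD []).length % 2 = 0
instance (string : String) : Decidable (Pre_line2msg2 string) := by unfold Pre_line2msg2; infer_instance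
def pvWitness_line2msg2 : String := "a:1:b:2:a:3:"

def Spec_line2msg2 (string : String) (out : List (String × String)) : Prop := out = line2msg2_alt string
instance (string : String) (out : List (String × String)) : Decidable (Spec_line2msg2 string out) := by unfold Spec_line2msg2; infer_instance

-- ===== CLAIM (what is proved, stated in full; the proofs are below) =====
def Claim_equal_line2msg2 : Prop := ∀ (string : String), Dom_line2msg2 string → Pre_line2msg2 string → Spec_line2msg2 string (line2msg2 string)

-- ===== LEMMAS AND PROOFS =====

-- consecutive (key, value) pairs of a list
def pvChunks : List String → List (String × String)
  | a :: b :: t => (a, b) :: pvChunks t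
  | _ => []

theorem pv_map_range_two : ∀ (l : List String), l.length % 2 = 0 →
    (List.range (l.length / 2)).map (fun t => (l.getD (2 * t) "", l.getD (2 * t + 1) "")) = pvChunks l
  | [], _ => rfl
  | [a], h => by simp [List.length_cons] at h
  | a :: b :: t, h => by
    have ht : t.length % 2 = 0 := by simp [List.length_cons] at h; omega
    have hlen : (a :: b :: t).length / 2 = t.length / 2 + 1 := by
      simp [List.length_cons]; omega
    rw [hlen, List.range_succ_eq_map]
    simp only [List.map_cons, List.map_map]
    have hhead : ((a :: b :: t).getD (2 * 0) "", (a :: b :: t).getD (2 * 0 + 1) "") = (a, b) := rfl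
    rw [hhead]
    have hcong : ∀ s ∈ List.range (t.length / 2),
        ((fun t' => ((a :: b :: t).getD (2 * t') "", (a :: b :: t).getD (2 * t' + 1) "")) ∘ Nat.succ) s
          = (fun t' => (t.getD (2 * t') "", t.getD (2 * t' + 1) "")) s := by
      intro s _
      show ((a :: b :: t).getD (2 * Nat.succ s) "", (a :: b :: t).getD (2 * Nat.succ s + 1) "") = _
      have e1 : 2 * Nat.succ s = 2 * s + 1 + 1 := by omega
      have e2 : 2 * Nat.succ s + 1 = 2 * s + 1 + 1 + 1 := by omega
      rw [e2, e1, List.getD_cons_succ, List.getD_cons_succ, List.getD_cons_succ, List.getD_cons_succ]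
    rw [List.map_congr_left hcong, pv_map_range_two t ht]
    simp [pvChunks]

theorem pv_pyRange_two (n : Nat) (h : n % 2 = 0) :
    PySem.List.pyRange 0 (n : Int) 2 = List.map (fun t : Nat => (2 * (t : Int))) (List.range (n / 2)) := by
  rw [PySem.List.pyRange_of_pos 0 (n : Int) (by norm_num)]
  have hcnt : (if (0:Int) < (n:Int) then (((n:Int) - 0 + 2 - 1) / 2).toNat else 0) = n / 2 := by
    split <;> omega
  rw [hcnt]
  apply List.map_congr_left
  intro k _
  omega

theorem pv_pairs_eq (l : List String) (h : l.length % 2 = 0) :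
    (PySem.List.pyRange 0 (PySem.List.len l) 2).map
        (fun i => (PySem.List.pyGetD l i "", PySem.List.pyGetD l (i + 1) "")) = pvChunks l := by
  have hlen : PySem.List.len l = (l.length : Int) := rfl
  rw [hlen, pv_pyRange_two l.length h, List.map_map]
  rw [← pv_map_range_two l h]
  apply List.map_congr_left
  intro t _
  show (PySem.List.pyGetD l (2 * (t:Int)) "", PySem.List.pyGetD l (2 * (t:Int) + 1) "") = _
  have e1 : (2 * (t:Int)) = ((2 * t : Nat) : Int) := by push_cast; ring
  have e2 : (2 * (t:Int) + 1) = ((2 * t + 1 : Nat) : Int) := by push_cast; ring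
  rw [e2, e1, PySem.List.pyGetD_natCast, PySem.List.pyGetD_natCast]

theorem pv_foldl_range_two {β : Type} (g : β → String → String → β) :
    ∀ (l : List String) (d0 : β), l.length % 2 = 0 →
    (List.range (l.length / 2)).foldl
        (fun d t => g d (l.getD (2 * t) "") (l.getD (2 * t + 1) "")) d0
      = (pvChunks l).foldl (fun d p => g d p.1 p.2) d0
  | [], d0, _ => rfl
  | [a], d0, h => by simp [List.length_cons] at h
  | a :: b :: t, d0, h => by
    have ht : t.length % 2 = 0 := by simp [List.length_cons] at h; omega
    have hlen : (a :: b :: t).length / 2 = t.length / 2 + 1 := by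
      simp [List.length_cons]; omega
    rw [hlen, List.range_succ_eq_map]
    simp only [List.foldl_cons, List.foldl_map]
    have hhead : g d0 ((a :: b :: t).getD (2 * 0) "") ((a :: b :: t).getD (2 * 0 + 1) "") = g d0 a b := rfl
    rw [hhead]
    have hcong : ∀ (acc : β) (s : Nat), s ∈ List.range (t.length / 2) →
        g acc ((a :: b :: t).getD (2 * Nat.succ s) "") ((a :: b :: t).getD (2 * Nat.succ s + 1) "")
          = g acc (t.getD (2 * s) "") (t.getD (2 * s + 1) "") := by
      intro acc s _
      have e1 : 2 * Nat.succ s = 2 * s + 1 + 1 := by omega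
      have e2 : 2 * Nat.succ s + 1 = 2 * s + 1 + 1 + 1 := by omega
      rw [e2, e1, List.getD_cons_succ, List.getD_cons_succ, List.getD_cons_succ, List.getD_cons_succ]
    rw [PySem.List.foldl_congr_mem _ _ _ _ hcong]
    simp only [pvChunks, List.foldl_cons]
    exact pv_foldl_range_two g t (g d0 a b) ht

theorem pv_foldl_pyRange_two {β : Type} (g : β → String → String → β) (l : List String) (d0 : β)
    (h : l.length % 2 = 0) :
    (PySem.List.pyRange 0 (PySem.List.len l) 2).foldl
        (fun d i => g d (PySem.List.pyGetD l i "") (PySem.List.pyGetD l (i + 1) "")) d0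
      = (pvChunks l).foldl (fun d p => g d p.1 p.2) d0 := by
  have hlen : PySem.List.len l = (l.length : Int) := rfl
  rw [hlen, pv_pyRange_two l.length h]
  rw [List.foldl_map]
  refine (PySem.List.foldl_congr_mem _ _ _ _ ?_).trans (pv_foldl_range_two g l d0 h)
  intro acc t _
  show g acc (PySem.List.pyGetD l (2 * (t:Int)) "") (PySem.List.pyGetD l (2 * (t:Int) + 1) "")
    = g acc (l.getD (2 * t) "") (l.getD (2 * t + 1) "")
  have e1 : (2 * (t:Int)) = ((2 * t : Nat) : Int) := by push_cast; ring
  have e2 : (2 * (t:Int) + 1) = ((2 * t + 1 : Nat) : Int) := by push_cast; ring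
  rw [e2, e1, PySem.List.pyGetD_natCast, PySem.List.pyGetD_natCast]

theorem pv_step_modify (d : PySem.Dict String (List String)) (k v : String) :
    (if d.contains k then d.modify k [] (fun vs => vs ++ [v]) else d.insert k [v])
      = d.modify k [] (fun vs => vs ++ [v]) := by
  by_cases hc : d.contains k = true
  · rw [if_pos hc]
  · have hc' : d.contains k = false := by simpa using hc
    rw [if_neg (by simp [hc'])]
    show d.insert k [v] = d.insert k (d.getD k [] ++ [v])
    rw [PySem.Dict.getD_of_not_contains d [] hc', List.nil_append]

theorem pv_data_eq (l : List String) (h : l.length % 2 = 0) :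
    (PySem.List.pyRange 0 (PySem.List.len l) 2).foldl
        (fun d i =>
          if d.contains (PySem.List.pyGetD l i "") then
            d.modify (PySem.List.pyGetD l i "") [] (fun vs => vs ++ [PySem.List.pyGetD l (i + 1) ""])
          else d.insert (PySem.List.pyGetD l i "") [PySem.List.pyGetD l (i + 1) ""])
        PySem.Dict.empty
      = (pvChunks l).foldl (fun d p => d.modify p.1 [] (fun vs => vs ++ [p.2])) PySem.Dict.empty := by
  simp only [pv_step_modify]
  exact pv_foldl_pyRange_two (fun d k v => d.modify k [] (fun vs => vs ++ [v])) l PySem.Dict.empty h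

theorem pv_occ_length (ps : List (String × String)) (k : String) :
    ((ps.filter (fun p => p.1 == k)).map (fun x => x.2)).length
      = List.count k (ps.map (fun p => p.1)) := by
  rw [List.length_map, ← List.countP_eq_length_filter]
  rw [List.count, List.countP_map]
  rfl

theorem pv_inner (k : String) (g : List String) (d : PySem.Dict String String) :
    (PySem.List.enumerate g).foldl
        (fun d p => d.insert (k ++ "." ++ PySem.Int.toStr p.1) p.2) d
      = (PySem.List.pyRange 0 (PySem.List.len g)).foldl
          (fun d i => d.insert (k ++ "." ++ PySem.Int.toStr i) (PySem.List.pyGetD g i "")) d := by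
  rw [PySem.List.enumerate_eq_map_pyRange g "", List.foldl_map]

theorem pv_f_single (ps : List (String × String)) (p : String × String) (hp : p ∈ ps)
    (h1 : List.count p.1 (ps.map (fun q => q.1)) = 1) :
    PySem.List.pyGetD ((ps.filter (fun q => q.1 == p.1)).map (fun x => x.2)) 0 "" = p.2 := by
  have hlen : (ps.filter (fun q => q.1 == p.1)).length = 1 := by
    rw [← List.countP_eq_length_filter]
    rw [List.count, List.countP_map] at h1
    exact h1
  obtain ⟨q, hq⟩ := List.length_eq_one_iff.mp hlen
  have hpm : p ∈ ps.filter (fun q => q.1 == p.1) := List.mem_filter.mpr ⟨hp, by simp⟩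
  rw [hq, List.mem_singleton] at hpm
  subst hpm
  rw [hq]
  rfl

theorem pv_singles_eq : ∀ (ps : List (String × String)) (P : String → Bool) (f : String → String),
    (∀ k, P k = true → List.count k (ps.map (fun p => p.1)) ≤ 1) →
    (∀ p ∈ ps, P p.1 = true → f p.1 = p.2) →
    ((PySem.Set.ofList (ps.map (fun p => p.1))).filter P).map (fun k => (k, f k))
      = ps.filter (fun p => P p.1)
  | [], _, _, _, _ => rfl
  | p :: t, P, f, hP, hf => by
    have hPt : ∀ k, P k = true → List.count k (t.map (fun p => p.1)) ≤ 1 := by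
      intro k hk
      have := hP k hk
      have hle : List.count k (t.map (fun q => q.1)) ≤ List.count k ((p :: t).map (fun q => q.1)) := by
        simp only [List.map_cons]
        exact List.count_le_count_cons
      omega
    have hft : ∀ q ∈ t, P q.1 = true → f q.1 = q.2 := fun q hq => hf q (List.mem_cons_of_mem p hq)
    simp only [List.map_cons, PySem.Set.ofList_cons]
    by_cases hp : P p.1 = true
    · have hcnt : List.count p.1 ((p :: t).map (fun q => q.1)) ≤ 1 := hP p.1 hp
      have hnot : p.1 ∉ t.map (fun q => q.1) := by
        simp only [List.map_cons, List.count_cons_self] at hcnt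
        have : List.count p.1 (t.map (fun q => q.1)) = 0 := by omega
        exact List.count_eq_zero.mp this
      have hdis : (PySem.Set.ofList (t.map (fun q => q.1))).discard p.1
          = PySem.Set.ofList (t.map (fun q => q.1)) := by
        show List.filter _ _ = _
        apply List.filter_eq_self.mpr
        intro y hy
        have hyy : y ∈ t.map (fun q => q.1) := by
          simpa [pysem] using hy
        have : y ≠ p.1 := fun e => hnot (e ▸ hyy)
        simpa using this
      rw [hdis]
      have hrec := pv_singles_eq t P f hPt hft
      simp only [List.filter_cons, hp, if_true, List.map_cons,
        hf p List.mem_cons_self hp, hrec, Prod.mk.eta]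
    · have hp' : P p.1 = false := by simpa using hp
      have hdis : ((PySem.Set.ofList (t.map (fun q => q.1))).discard p.1).filter P
          = (PySem.Set.ofList (t.map (fun q => q.1))).filter P := by
        show (List.filter _ _).filter P = _
        rw [List.filter_filter]
        apply List.filter_congr
        intro y _
        by_cases hy : y = p.1
        · subst hy; simp [hp']
        · simp [hy]
      have hrec := pv_singles_eq t P f hPt hft
      simp only [List.filter_cons, hp', Bool.false_eq_true, if_false, hdis, hrec]

theorem pv_update_singles (ps : List (String × String)) (D : PySem.Dict String String) :
    D.update ((PySem.Set.ofList (ps.map (fun p => p.1))).foldl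
        (fun d k => if List.count k (ps.map (fun p => p.1)) == 1 then
            d.insert k (PySem.List.pyGetD ((ps.filter (fun p => p.1 == k)).map (fun x => x.2)) 0 "")
          else d)
        PySem.Dict.empty).items
      = ps.foldl (fun d p => if List.count p.1 (ps.map (fun p => p.1)) == 1 then d.insert p.1 p.2 else d) D := by
  have hd2 : (PySem.Set.ofList (ps.map (fun p => p.1))).foldl
      (fun d k => if List.count k (ps.map (fun p => p.1)) == 1 then
          d.insert k (PySem.List.pyGetD ((ps.filter (fun p => p.1 == k)).map (fun x => x.2)) 0 "")
        else d) PySem.Dict.empty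
      = ((PySem.Set.ofList (ps.map (fun p => p.1))).filter
          (fun k => List.count k (ps.map (fun p => p.1)) == 1)).foldl
        (fun d k => d.insert k (PySem.List.pyGetD ((ps.filter (fun p => p.1 == k)).map (fun x => x.2)) 0 ""))
        PySem.Dict.empty :=
    PySem.List.foldl_if_eq_foldl_filter _ _ _ _
  rw [hd2]
  have hnodup : (((PySem.Set.ofList (ps.map (fun p => p.1))).filter
      (fun k => List.count k (ps.map (fun p => p.1)) == 1)).map (fun a => a)).Nodup := by
    rw [List.map_id']
    exact (PySem.Set.nodup_ofList (ps.map (fun p => p.1))).filter _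
  have hitems : (((PySem.Set.ofList (ps.map (fun p => p.1))).filter
      (fun k => List.count k (ps.map (fun p => p.1)) == 1)).foldl
        (fun d k => d.insert k (PySem.List.pyGetD ((ps.filter (fun p => p.1 == k)).map (fun x => x.2)) 0 ""))
        PySem.Dict.empty).items
      = ((PySem.Set.ofList (ps.map (fun p => p.1))).filter
          (fun k => List.count k (ps.map (fun p => p.1)) == 1)).map
        (fun k => (k, PySem.List.pyGetD ((ps.filter (fun p => p.1 == k)).map (fun x => x.2)) 0 "")) := by
    have h2 := PySem.Dict.items_foldl_insert_fresh
      ((PySem.Set.ofList (ps.map (fun p => p.1))).filter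
        (fun k => List.count k (ps.map (fun p => p.1)) == 1))
      (fun a => a)
      (fun k => PySem.List.pyGetD ((ps.filter (fun p => p.1 == k)).map (fun x => x.2)) 0 "")
      PySem.Dict.empty
      (fun a _ => PySem.Dict.contains_empty a)
      hnodup
    simpa using h2
  rw [hitems]
  have hsing := pv_singles_eq ps
    (fun k => List.count k (ps.map (fun p => p.1)) == 1)
    (fun k => PySem.List.pyGetD ((ps.filter (fun p => p.1 == k)).map (fun x => x.2)) 0 "")
    (by intro k hk; simp only [beq_iff_eq] at hk; omega)
    (by
      intro p hp hk
      simp only [beq_iff_eq] at hk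
      exact pv_f_single ps p hp hk)
  rw [hsing]
  have hB : ps.foldl (fun d p => if List.count p.1 (ps.map (fun p => p.1)) == 1 then d.insert p.1 p.2 else d) D
      = (ps.filter (fun p => List.count p.1 (ps.map (fun p => p.1)) == 1)).foldl
        (fun d p => d.insert p.1 p.2) D :=
    PySem.List.foldl_if_eq_foldl_filter _ _ _ _
  rw [hB]
  rfl

-- ===== VERDICT (by name: the statement is the Claim_ definition above) =====
theorem line2msg2_spec : Claim_equal_line2msg2 := by
  intro s _ hpre
  unfold Pre_line2msg2 at hpre
  unfold Spec_line2msg2 line2msg2 line2msg2_alt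
  generalize hL : (PySem.Str.split? (PySem.Str.slice s none (some (-1))) ":").getD [] = l at hpre ⊢
  simp only [pv_pairs_eq l hpre]
  rw [pv_data_eq l hpre]
  have hkeys : ((pvChunks l).foldl (fun d p => d.modify p.1 [] (fun vs => vs ++ [p.2])) PySem.Dict.empty).keys
      = PySem.Set.ofList ((pvChunks l).map (fun p => p.1)) := by
    have h1 := PySem.Dict.keys_foldl_modify_key (pvChunks l) (fun p => p.1) []
      (fun _ p => fun vs => vs ++ [p.2]) PySem.Dict.empty
    simpa [PySem.Set.update_nil_left] using h1
  have hgetD : ∀ k, ((pvChunks l).foldl (fun d p => d.modify p.1 [] (fun vs => vs ++ [p.2])) PySem.Dict.empty).getD k []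
      = ((pvChunks l).filter (fun p => p.1 == k)).map (fun x => x.2) := by
    intro k
    simpa using PySem.Dict.getD_foldl_modify_append (pvChunks l) PySem.Dict.empty k
  simp only [hkeys, hgetD]
  simp only [PySem.List.dedup_eq_ofList, PySem.List.count_eq, pv_occ_length, pv_inner]
  refine congrArg PySem.Dict.items ?_
  exact pv_update_singles (pvChunks l) _
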